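-- pv_equiv track=rewrite | github.com/paiml/depyler | examples/hard_bit_rotation.py | count_rotations_to_match
-- ===== SOURCE A (Python) =====
-- def count_rotations_to_match(a: int, b: int) -> int:
--     """Count minimum left rotations of 8-bit value a to match b."""
--     mask: int = 255
--     a = a & mask
--     b = b & mask
--     rot: int = 0
--     while rot < 8:
--         current: int = ((a << rot) | (a >> (8 - rot))) & mask
--         if current == b:
--             return rot
--         rot = rot + 1
--     return -1
-- ===== SOURCE B (Python) =====
-- def count_rotations_to_match(a: int, b: int) -> int:
--     """Count minimum left rotations of 8-bit value a to match b."""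
--     s = format(a & 255, '08b')
--     return (s + s).find(format(b & 255, '08b'))
-- ===== Notes on version B (the rewrite author's own statement) =====
-- stated objective: simpler
-- what changed: B drops A's try-each-rotation-and-compare loop entirely: it uses the doubled-string theorem (every rotation of s is an 8-char substring of s+s, and the first occurrence index is the minimum rotation), so the answer is one substring search (s+s).find(format(b & 255, '08b')), with find's -1 doubling as the no-match result.
import Mathlib
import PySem

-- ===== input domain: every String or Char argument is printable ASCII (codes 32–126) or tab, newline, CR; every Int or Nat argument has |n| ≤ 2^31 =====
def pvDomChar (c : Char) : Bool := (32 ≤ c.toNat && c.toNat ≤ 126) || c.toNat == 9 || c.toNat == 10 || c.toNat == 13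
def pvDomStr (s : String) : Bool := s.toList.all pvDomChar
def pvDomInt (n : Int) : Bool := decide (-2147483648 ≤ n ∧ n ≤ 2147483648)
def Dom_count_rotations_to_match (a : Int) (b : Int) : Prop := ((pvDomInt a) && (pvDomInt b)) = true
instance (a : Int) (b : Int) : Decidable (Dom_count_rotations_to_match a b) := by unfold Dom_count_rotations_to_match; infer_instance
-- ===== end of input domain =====

-- B replaces A's try-each-rotation-and-compare loop with the doubled-string trick: the answer
-- is the index returned by one substring search, (s+s).find(b's 8-bit binary string), where s
-- is a's binary string — no rotation loop at all (objective: simpler).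

-- ===== PORT A =====
-- A's while loop as recursion; fuel 9 strictly exceeds the loop's ≤ 8 iterations, so it only
-- bounds the recursion and never changes the result (rot stays ≥ 0, so .toNat is exact)
def pvAGo (a : Int) (b : Int) (rot : Int) : Nat → Int
  | 0 => -1
  | fuel + 1 =>
    if rot < 8 then
      let current : Int :=
        PySem.Int.band (PySem.Int.bor (a <<< rot.toNat) (a >>> (8 - rot).toNat)) 255
      if current = b then rot else pvAGo a b (rot + 1) fuel
    else -1

def count_rotations_to_match (a : Int) (b : Int) : Int :=
  pvAGo (PySem.Int.band a 255) (PySem.Int.band b 255) 0 9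

-- ===== PORT B =====
-- format(m, '08b') for 0 ≤ m < 256: the 8 binary digits, most significant first (exact there)
def pvBin8 (m : Nat) : List Char :=
  (List.range 8).map (fun i => if (m >>> (7 - i)) % 2 = 1 then '1' else '0')

-- (s + s).find(t) via the PySem string-find primitive on code points (exact)
def count_rotations_to_match_alt (a : Int) (b : Int) : Int :=
  let s := pvBin8 (PySem.Int.band a 255).toNat
  PySem.Chars.find (s ++ s) (pvBin8 (PySem.Int.band b 255).toNat)

-- ===== PRECONDITION & SPEC =====
def Spec_count_rotations_to_match (a : Int) (b : Int) (out : Int) : Prop := out = count_rotations_to_match_alt a b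
instance (a : Int) (b : Int) (out : Int) : Decidable (Spec_count_rotations_to_match a b out) := by unfold Spec_count_rotations_to_match; infer_instance

-- ===== CLAIM (what is proved, stated in full; the proofs are below) =====
def Claim_equal_count_rotations_to_match : Prop := ∀ (a : Int) (b : Int), Dom_count_rotations_to_match a b → Spec_count_rotations_to_match a b (count_rotations_to_match a b)

-- ===== LEMMAS AND PROOFS =====

-- the left rotation of an 8-bit value, on Nat
def pvNatRot (k r : Nat) : Nat := ((k <<< r) ||| (k >>> (8 - r))) % 256

-- read an 8-digit binary string back (inverse of pvBin8 on [0,256))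
def pvUnbin (cs : List Char) : Nat := cs.foldl (fun a c => 2 * a + (if c = '1' then 1 else 0)) 0

-- a & 255 always lands in [0, 256)
theorem pv_band255_bounds (a : Int) :
    0 ≤ PySem.Int.band a 255 ∧ PySem.Int.band a 255 < 256 := by
  have h := Nat.and_le_right (n := a.toNat) (m := (255 : Int).toNat)
  unfold PySem.Int.band
  split_ifs with h1 h2 h3 <;> omega

-- A's per-iteration arithmetic is pvNatRot
set_option maxRecDepth 10000 in
theorem pv_rot_arith : ∀ (k : Fin 256) (r : Fin 8),
    PySem.Int.band (PySem.Int.bor ((k.val : Int) <<< r.val) ((k.val : Int) >>> (8 - r.val))) 255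
      = ((pvNatRot k.val r.val : Nat) : Int) := by decide

-- the 8-char window of the doubled string at offset r is the binary string of the rotation
set_option maxRecDepth 10000 in
theorem pv_window : ∀ (k : Fin 256) (r : Fin 9),
    ((pvBin8 k.val ++ pvBin8 k.val).drop r.val).take 8 = pvBin8 (pvNatRot k.val (r.val % 8)) := by
  decide

-- pvBin8 is injective on [0, 256) via its left inverse
set_option maxRecDepth 10000 in
theorem pv_unbin_bin : ∀ (m : Fin 256), pvUnbin (pvBin8 m.val) = m.val := by decide

theorem pv_bin8_length (m : Nat) : (pvBin8 m).length = 8 := by simp [pvBin8]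

theorem pv_bin8_inj {m1 m2 : Nat} (h1 : m1 < 256) (h2 : m2 < 256)
    (h : pvBin8 m1 = pvBin8 m2) : m1 = m2 := by
  have e1 := pv_unbin_bin ⟨m1, h1⟩
  have e2 := pv_unbin_bin ⟨m2, h2⟩
  simp only at e1 e2
  rw [← e1, ← e2, h]

theorem pv_natRot_lt (k r : Nat) : pvNatRot k r < 256 := Nat.mod_lt _ (by norm_num)

-- characterization of PySem's string-find scanner: the first offset whose suffix starts with sub
theorem pv_go_spec (sub : List Char) (hsub : sub ≠ []) (l : List Char) : ∀ (pos : Nat),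
    PySem.Chars.find.go sub l pos =
      match (List.range l.length).find? (fun i => sub.isPrefixOf (l.drop i)) with
      | some i => ((pos + i : Nat) : Int)
      | none => -1 := by
  induction l with
  | nil =>
      intro pos
      simp [PySem.Chars.find.go, List.isEmpty_iff, hsub]
  | cons c rest ih =>
      intro pos
      rw [PySem.Chars.find.go]
      by_cases h0 : sub.isPrefixOf (c :: rest) = true
      · simp [List.length_cons, List.range_succ_eq_map, h0]
      · have hrw : List.range (c :: rest).length =
            0 :: (List.range rest.length).map (· + 1) := by
          simp [List.length_cons, List.range_succ_eq_map]
        rw [if_neg h0, hrw, ih (pos + 1)]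
        rw [List.find?_cons_of_neg (by simp [h0]), List.find?_map]
        cases hf : (List.range rest.length).find? (fun i => sub.isPrefixOf (rest.drop i)) with
        | none =>
            have : (List.range rest.length).find?
                ((fun i => sub.isPrefixOf ((c :: rest).drop i)) ∘ (· + 1)) = none := by
              simpa [Function.comp_def] using hf
            simp [this]
        | some i =>
            have : (List.range rest.length).find?
                ((fun i => sub.isPrefixOf ((c :: rest).drop i)) ∘ (· + 1)) = some i := by
              simpa [Function.comp_def] using hf
            simp only [this, Option.map_some]
            norm_num
            ring_nf

-- with both arguments reduced to 8 bits, A's loop equals B's doubled-string find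
theorem pv_core (k m : Nat) (hk : k < 256) (hm : m < 256) :
    pvAGo (k : Int) (m : Int) 0 9
      = PySem.Chars.find (pvBin8 k ++ pvBin8 k) (pvBin8 m) := by
  -- each prefix test at offset i ≤ 8 is the rotation test pvNatRot k (i % 8) = m
  have hlen : (pvBin8 k ++ pvBin8 k).length = 16 := by
    simp [pv_bin8_length]
  have hcond : ∀ r : Fin 9,
      (pvBin8 m).isPrefixOf ((pvBin8 k ++ pvBin8 k).drop r.val)
        = decide (pvNatRot k (r.val % 8) = m) := by
    intro r
    have hdlen : 8 ≤ ((pvBin8 k ++ pvBin8 k).drop r.val).length := by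
      simp only [List.length_drop, hlen]; omega
    by_cases h : (pvBin8 m).isPrefixOf ((pvBin8 k ++ pvBin8 k).drop r.val) = true
    · have hpre := List.isPrefixOf_iff_prefix.mp h
      have htake := List.prefix_iff_eq_take.mp hpre
      rw [pv_bin8_length] at htake
      rw [pv_window ⟨k, hk⟩ r] at htake
      have := pv_bin8_inj hm (pv_natRot_lt k _) htake
      simp [h, this.symm]
    · have h' : ¬ pvNatRot k (r.val % 8) = m := by
        intro heq
        apply h
        apply List.isPrefixOf_iff_prefix.mpr
        apply List.prefix_iff_eq_take.mpr
        rw [pv_bin8_length, pv_window ⟨k, hk⟩ r, heq]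
      simp only [Bool.not_eq_true] at h
      rw [h]
      simp [h']
  -- prefix tests past offset 8 fail: the suffix is shorter than the pattern
  have hcondBig : ∀ i : Nat, 9 ≤ i →
      (pvBin8 m).isPrefixOf ((pvBin8 k ++ pvBin8 k).drop i) = false := by
    intro i hi
    rw [← Bool.not_eq_true, List.isPrefixOf_iff_prefix]
    intro hpre
    have := hpre.length_le
    simp only [List.length_drop, hlen, pv_bin8_length] at this
    omega
  -- evaluate B's find through the scanner characterization
  have hne : pvBin8 m ≠ [] := by
    intro h; have := congrArg List.length h; simp [pv_bin8_length] at this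
  have hB : PySem.Chars.find (pvBin8 k ++ pvBin8 k) (pvBin8 m)
      = match (List.range 16).find?
            (fun i => (pvBin8 m).isPrefixOf ((pvBin8 k ++ pvBin8 k).drop i)) with
        | some i => ((i : Nat) : Int)
        | none => -1 := by
    rw [PySem.Chars.find, pv_go_spec _ hne, hlen]
    cases (List.range 16).find?
        (fun i => (pvBin8 m).isPrefixOf ((pvBin8 k ++ pvBin8 k).drop i)) <;> simp
  rw [hB]
  have hrange : List.range 16 = [0,1,2,3,4,5,6,7,8,9,10,11,12,13,14,15] := by decide
  rw [hrange]
  have c0 := hcond 0; have c1 := hcond 1; have c2 := hcond 2; have c3 := hcond 3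
  have c4 := hcond 4; have c5 := hcond 5; have c6 := hcond 6; have c7 := hcond 7
  have c8 := hcond 8
  simp only [Fin.isValue] at c0 c1 c2 c3 c4 c5 c6 c7 c8
  norm_num at c0 c1 c2 c3 c4 c5 c6 c7 c8
  -- evaluate A's loop step by step
  have r0 := pv_rot_arith ⟨k, hk⟩ 0; have r1 := pv_rot_arith ⟨k, hk⟩ 1
  have r2 := pv_rot_arith ⟨k, hk⟩ 2; have r3 := pv_rot_arith ⟨k, hk⟩ 3
  have r4 := pv_rot_arith ⟨k, hk⟩ 4; have r5 := pv_rot_arith ⟨k, hk⟩ 5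
  have r6 := pv_rot_arith ⟨k, hk⟩ 6; have r7 := pv_rot_arith ⟨k, hk⟩ 7
  simp only [Fin.isValue] at r0 r1 r2 r3 r4 r5 r6 r7
  norm_num at r0 r1 r2 r3 r4 r5 r6 r7
  simp only [pvAGo, List.find?]
  norm_num [r0, r1, r2, r3, r4, r5, r6, r7, c0, c1, c2, c3, c4, c5, c6, c7, c8,
    hcondBig 9 (by omega), hcondBig 10 (by omega), hcondBig 11 (by omega),
    hcondBig 12 (by omega), hcondBig 13 (by omega), hcondBig 14 (by omega),
    hcondBig 15 (by omega)]
  split_ifs <;> simp_all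

-- ===== VERDICT (by name: the statement is the Claim_ definition above) =====
theorem count_rotations_to_match_spec : Claim_equal_count_rotations_to_match := by
  intro a b _
  unfold Spec_count_rotations_to_match count_rotations_to_match count_rotations_to_match_alt
  obtain ⟨ha0, ha1⟩ := pv_band255_bounds a
  obtain ⟨hb0, hb1⟩ := pv_band255_bounds b
  have hka : ((PySem.Int.band a 255).toNat : Int) = PySem.Int.band a 255 := by omega
  have hkb : ((PySem.Int.band b 255).toNat : Int) = PySem.Int.band b 255 := by omega
  have := pv_core (PySem.Int.band a 255).toNat (PySem.Int.band b 255).toNat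
    (by omega) (by omega)
  rw [hka, hkb] at this
  exact this
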